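-- pv_equiv track=rewrite | github.com/Rahul12344/PubMedDownload | src/model/enrichment.py | create_go_dicts
-- ===== SOURCE A (Python) =====
-- def create_go_dicts(ens_ids, ens_to_hgnc_dict, annotations_hgnc, gene_ontology):
--     superset_list = []
--     for ens_id in ens_ids:
--         hgnc = convert_ens_to_hgnc(ens_id, ens_to_hgnc_dict)
--         superset = set()
--         if hgnc != "Not Found":
--             go_ids = convert_hgnc_to_go(hgnc, annotations_hgnc)
--             if go_ids != []:
--                 for go_id in go_ids:
--                     superset = superset.union(explore_full_depth(go_id, set(), gene_ontology))
--         superset_list.extend(list(superset))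
--     return superset_list
--
-- def convert_ens_to_hgnc(ens_id, ens_to_hgnc):
--     if ens_id in ens_to_hgnc:
--         return ens_to_hgnc[ens_id]
--     return "Not Found"
--
-- def convert_hgnc_to_go(hgnc_id, hgnc_to_go):
--     if hgnc_id in hgnc_to_go:
--         return hgnc_to_go[hgnc_id]
--     return []
--
-- def explore_full_depth(id, curr_set, gene_ontology):
--     info = get_info(id, gene_ontology)
--     curr_set.add(id)
--     is_as = get_is_as(info)
--     if is_as == []:
--         return curr_set
--     for is_a in is_as:
--         if is_a not in curr_set:
--             explore_full_depth(is_a, curr_set, gene_ontology)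
--
--     return curr_set
--
-- def get_info(id, gene_ontology):
--     for entry in gene_ontology:
--         if "id" in entry and entry["id"][0] == id:
--             return entry
--     return None
--
-- def get_is_as(info):
--     if info != None and "is_a" in info:
--         return info["is_a"]
--     return []
-- ===== SOURCE B (Python) =====
-- def create_go_dicts(ens_ids, ens_to_hgnc_dict, annotations_hgnc, gene_ontology):
--     # One pass over the ontology builds a go_id -> is_a-parents index (first entry
--     # wins, like A's linear scan); each gene's ancestor set is then collected by an
--     # iterative stack DFS instead of A's recursion with a repeated ontology scan.
--     parents = {}
--     for entry in gene_ontology: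
--         if "id" in entry and entry["id"]:
--             parents.setdefault(entry["id"][0], entry.get("is_a", []))
--
--     def ancestors(ens_id):
--         superset = set()
--         hgnc = ens_to_hgnc_dict.get(ens_id, "Not Found")
--         if hgnc == "Not Found":
--             return superset
--         for go_id in annotations_hgnc.get(hgnc, []):
--             visited = set()
--             stack = [go_id]
--             while stack:
--                 node = stack.pop()
--                 if node not in visited:
--                     visited.add(node)
--                     stack.extend(reversed(parents.get(node, [])))
--             superset |= visited
--         return superset
--
--     return [term for ens_id in ens_ids for term in ancestors(ens_id)]
-- ===== Notes on version B (the rewrite author's own statement) =====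
-- stated objective: alternative
-- what changed: A's recursive explore_full_depth, which rescans the whole ontology list on every visited node, is replaced by a go_id->parents dict built once plus an iterative stack DFS per gene; the output list is built by a comprehension instead of repeated extend.
-- outside the precondition, e.g. on create_go_dicts([], {}, {}, [{'id': []}]): A returns [], B returns []
import Mathlib
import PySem

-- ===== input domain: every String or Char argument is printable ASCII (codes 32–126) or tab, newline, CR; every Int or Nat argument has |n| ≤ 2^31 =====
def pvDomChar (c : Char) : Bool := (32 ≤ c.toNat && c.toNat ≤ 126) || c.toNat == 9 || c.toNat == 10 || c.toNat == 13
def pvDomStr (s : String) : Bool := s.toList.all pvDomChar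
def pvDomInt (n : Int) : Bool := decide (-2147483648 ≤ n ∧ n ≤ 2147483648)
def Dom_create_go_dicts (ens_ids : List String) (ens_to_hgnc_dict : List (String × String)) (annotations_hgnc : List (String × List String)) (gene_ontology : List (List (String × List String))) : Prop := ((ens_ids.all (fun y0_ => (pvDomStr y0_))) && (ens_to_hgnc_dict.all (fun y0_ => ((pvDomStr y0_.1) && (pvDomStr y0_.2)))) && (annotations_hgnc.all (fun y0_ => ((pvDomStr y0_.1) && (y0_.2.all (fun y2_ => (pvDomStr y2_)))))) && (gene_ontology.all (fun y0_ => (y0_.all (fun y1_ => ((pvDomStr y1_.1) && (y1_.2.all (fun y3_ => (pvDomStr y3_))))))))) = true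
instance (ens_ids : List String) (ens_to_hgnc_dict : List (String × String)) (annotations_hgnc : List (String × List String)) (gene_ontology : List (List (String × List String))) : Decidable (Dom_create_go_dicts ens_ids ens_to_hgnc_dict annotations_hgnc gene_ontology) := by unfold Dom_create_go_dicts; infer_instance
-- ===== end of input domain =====

-- B replaces A's recursive DFS with a per-node ontology rescan by a go_id->parents
-- dict built once plus an iterative stack DFS (objective: alternative algorithm).
-- The returned list is a set in Python (hash iteration order); both ports list each
-- per-gene set in first-insertion (DFS preorder) order, equal on both sides.

-- ===== PORT A =====

-- get_info: first ontology entry whose "id" value has head id; entry["id"][0] is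
-- PySem.List.pyGet? (none = IndexError, excluded by Pre_, treated as no match here)
def pvGetInfo (i : String) : List (List (String × List String)) → Option (List (String × List String))
  | [] => none
  | e :: rest =>
    match (PySem.Dict.mk e).get? "id" with
    | some v => if PySem.List.pyGet? v (0 : Int) == some i then some e else pvGetInfo i rest
    | none => pvGetInfo i rest

-- get_is_as
def pvGetIsas : Option (List (String × List String)) → List String
  | none => []
  | some e =>
    match (PySem.Dict.mk e).get? "is_a" with
    | some l => l
    | none => []

-- explore_full_depth; the fuel argument only makes the Python recursion structural
-- (gene_ontology.length + 1 bounds the recursion depth, proved in pvExplore_eq_dfs)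
def pvExplore (go : List (List (String × List String))) : Nat → String → PySem.Set String → PySem.Set String
  | 0, i, S => PySem.Set.add S i
  | f + 1, i, S =>
    let info := pvGetInfo i go
    let S1 := PySem.Set.add S i
    let isas := pvGetIsas info
    if isas = [] then S1
    else isas.foldl (fun T p => if PySem.Set.contains T p then T else pvExplore go f p T) S1

def create_go_dicts (ens_ids : List String) (ens_to_hgnc_dict : List (String × String)) (annotations_hgnc : List (String × List String)) (gene_ontology : List (List (String × List String))) : List String :=
  let fuel := gene_ontology.length + 1
  ens_ids.foldl (fun acc ens =>
    -- convert_ens_to_hgnc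
    let hgnc := match (PySem.Dict.mk ens_to_hgnc_dict).get? ens with
      | some h => h
      | none => "Not Found"
    let sup0 : PySem.Set String := PySem.Set.empty
    let sup :=
      if hgnc ≠ "Not Found" then
        -- convert_hgnc_to_go
        let go_ids := match (PySem.Dict.mk annotations_hgnc).get? hgnc with
          | some g => g
          | none => []
        if go_ids ≠ [] then
          go_ids.foldl (fun s gid => PySem.Set.union s (pvExplore gene_ontology fuel gid PySem.Set.empty)) sup0
        else sup0
      else sup0
    acc ++ sup) []

-- ===== PORT B =====

-- parents = {}; setdefault keeps the first entry for a go id, like A's scan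
def pvBuildParents (go : List (List (String × List String))) : PySem.Dict String (List String) :=
  go.foldl (fun d e =>
    match (PySem.Dict.mk e).get? "id" with
    | some (h :: _) => d.setdefault h ((PySem.Dict.mk e).getD "is_a" [])
    | _ => d) PySem.Dict.empty

-- unvisited keys of the parents dict: the termination measure of the DFS
def pvCnt (d : PySem.Dict String (List String)) (S : PySem.Set String) : Nat :=
  d.keys.countP (fun k => !(PySem.Set.contains S k))

theorem pvContains_add_ne (S : PySem.Set String) (i x : String) (hne : x ≠ i) :
    PySem.Set.contains (PySem.Set.add S i) x = PySem.Set.contains S x := by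
  rw [Bool.eq_iff_iff, PySem.Set.contains_iff, PySem.Set.contains_iff, PySem.Set.mem_add]
  constructor
  · rintro (h | rfl)
    · exact h
    · exact absurd rfl hne
  · exact Or.inl

theorem pvCnt_le_aux (S : PySem.Set String) (i : String) (l : List String) :
    List.countP (fun k => !PySem.Set.contains (PySem.Set.add S i) k) l
      ≤ List.countP (fun k => !PySem.Set.contains S k) l := by
  apply List.countP_mono_left
  intro x _ hx
  simp only [Bool.not_eq_true'] at hx ⊢
  cases hcs : PySem.Set.contains S x with
  | false => rfl
  | true =>
    exfalso
    have hmem : x ∈ PySem.Set.add S i := (PySem.Set.mem_add S i x).mpr (Or.inl ((PySem.Set.contains_iff S x).mp hcs))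
    rw [(PySem.Set.contains_iff _ x).mpr hmem] at hx
    exact absurd hx (by simp)

theorem pvCnt_add_of_mem_keys (d : PySem.Dict String (List String)) (S : PySem.Set String) (i : String)
    (hk : i ∈ d.keys) (hi : PySem.Set.contains S i = false) :
    pvCnt d (PySem.Set.add S i) < pvCnt d S := by
  obtain ⟨l1, l2, hl⟩ := List.append_of_mem hk
  unfold pvCnt
  rw [hl]
  simp only [List.countP_append, List.countP_cons]
  have h1 : List.countP (fun k => !PySem.Set.contains (PySem.Set.add S i) k) l1
      ≤ List.countP (fun k => !PySem.Set.contains S k) l1 := pvCnt_le_aux S i l1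
  have h2 : List.countP (fun k => !PySem.Set.contains (PySem.Set.add S i) k) l2
      ≤ List.countP (fun k => !PySem.Set.contains S k) l2 := pvCnt_le_aux S i l2
  have hnew : PySem.Set.contains (PySem.Set.add S i) i = true :=
    (PySem.Set.contains_iff _ i).mpr ((PySem.Set.mem_add S i i).mpr (Or.inr rfl))
  rw [hnew, hi]
  simp only [Bool.not_true, Bool.not_false, Bool.false_eq_true, if_false, if_true]
  omega

theorem pvCnt_add_of_not_mem_keys (d : PySem.Dict String (List String)) (S : PySem.Set String) (i : String)
    (hk : i ∉ d.keys) :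
    pvCnt d (PySem.Set.add S i) = pvCnt d S := by
  apply List.countP_congr
  intro x hx
  rw [pvContains_add_ne S i x (by rintro rfl; exact hk hx)]

-- the iterative DFS: stack head = top of the Python list stack (parents pushed reversed)
def pvDfs (d : PySem.Dict String (List String)) : List String → PySem.Set String → PySem.Set String
  | [], S => S
  | i :: rest, S =>
    if PySem.Set.contains S i then pvDfs d rest S
    else pvDfs d (d.getD i [] ++ rest) (PySem.Set.add S i)
termination_by stack S => (pvCnt d S, stack.length)
decreasing_by
  · exact Prod.Lex.right _ (Nat.lt_succ_self _)
  · rename_i hi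
    simp only [Bool.not_eq_true] at hi
    by_cases hk : i ∈ d.keys
    · exact Prod.Lex.left _ _ (pvCnt_add_of_mem_keys d S i hk hi)
    · rw [pvCnt_add_of_not_mem_keys d S i hk,
        PySem.Dict.getD_of_not_contains d []
          (by rw [← Bool.not_eq_true, PySem.Dict.contains_iff_mem_keys]; exact hk)]
      exact Prod.Lex.right _ (by simp)

def pvAncestors (pd : PySem.Dict String (List String)) (ens_to_hgnc_dict : List (String × String)) (annotations_hgnc : List (String × List String)) (ens : String) : PySem.Set String :=
  let hgnc := (PySem.Dict.mk ens_to_hgnc_dict).getD ens "Not Found"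
  if hgnc = "Not Found" then PySem.Set.empty
  else ((PySem.Dict.mk annotations_hgnc).getD hgnc []).foldl
    (fun sup gid => PySem.Set.union sup (pvDfs pd [gid] PySem.Set.empty)) PySem.Set.empty

def create_go_dicts_alt (ens_ids : List String) (ens_to_hgnc_dict : List (String × String)) (annotations_hgnc : List (String × List String)) (gene_ontology : List (List (String × List String))) : List String :=
  let pd := pvBuildParents gene_ontology
  ens_ids.flatMap (fun ens => pvAncestors pd ens_to_hgnc_dict annotations_hgnc ens)

-- ===== PRECONDITION & SPEC =====

-- Pre_ excludes ontologies containing an entry whose "id" value is the empty list: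
-- on those, A's get_info raises IndexError (entry["id"][0]) as soon as it scans
-- such an entry, while B just skips it.
def Pre_create_go_dicts (ens_ids : List String) (ens_to_hgnc_dict : List (String × String)) (annotations_hgnc : List (String × List String)) (gene_ontology : List (List (String × List String))) : Prop :=
  ∀ e ∈ gene_ontology, (PySem.Dict.mk e).get? "id" ≠ some []
instance (ens_ids : List String) (ens_to_hgnc_dict : List (String × String)) (annotations_hgnc : List (String × List String)) (gene_ontology : List (List (String × List String))) : Decidable (Pre_create_go_dicts ens_ids ens_to_hgnc_dict annotations_hgnc gene_ontology) := by unfold Pre_create_go_dicts; infer_instance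

def pvWitness_create_go_dicts : List String × (List (String × String)) × (List (String × List String)) × (List (List (String × List String))) :=
  (["E1"], [("E1", "H1")], [("H1", ["G1"])], [[("id", ["G1"]), ("is_a", ["G2"])], [("id", ["G2"])]])

def Spec_create_go_dicts (ens_ids : List String) (ens_to_hgnc_dict : List (String × String)) (annotations_hgnc : List (String × List String)) (gene_ontology : List (List (String × List String))) (out : List String) : Prop := out = create_go_dicts_alt ens_ids ens_to_hgnc_dict annotations_hgnc gene_ontology
instance (ens_ids : List String) (ens_to_hgnc_dict : List (String × String)) (annotations_hgnc : List (String × List String)) (gene_ontology : List (List (String × List String))) (out : List String) : Decidable (Spec_create_go_dicts ens_ids ens_to_hgnc_dict annotations_hgnc gene_ontology out) := by unfold Spec_create_go_dicts; infer_instance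

-- ===== CLAIM (what is proved, stated in full; the proofs are below) =====
def Claim_equal_create_go_dicts : Prop := ∀ (ens_ids : List String) (ens_to_hgnc_dict : List (String × String)) (annotations_hgnc : List (String × List String)) (gene_ontology : List (List (String × List String))), Dom_create_go_dicts ens_ids ens_to_hgnc_dict annotations_hgnc gene_ontology → Pre_create_go_dicts ens_ids ens_to_hgnc_dict annotations_hgnc gene_ontology → Spec_create_go_dicts ens_ids ens_to_hgnc_dict annotations_hgnc gene_ontology (create_go_dicts ens_ids ens_to_hgnc_dict annotations_hgnc gene_ontology)

-- ===== LEMMAS AND PROOFS =====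

theorem pvCnt_add_le (d : PySem.Dict String (List String)) (S : PySem.Set String) (i : String) :
    pvCnt d (PySem.Set.add S i) ≤ pvCnt d S := by
  unfold pvCnt
  exact pvCnt_le_aux S i d.keys


-- agreement of B's dict with A's get_info/get_is_as scan, generalized over the accumulator
theorem pvBuildParents_agree : ∀ (go : List (List (String × List String))),
    (∀ e ∈ go, (PySem.Dict.mk e).get? "id" ≠ some []) →
    ∀ (d : PySem.Dict String (List String)) (i : String),
      ((go.foldl (fun d e =>
          match (PySem.Dict.mk e).get? "id" with
          | some (h :: _) => d.setdefault h ((PySem.Dict.mk e).getD "is_a" [])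
          | _ => d) d).contains i
        = (d.contains i || (pvGetInfo i go).isSome))
      ∧ ((go.foldl (fun d e =>
          match (PySem.Dict.mk e).get? "id" with
          | some (h :: _) => d.setdefault h ((PySem.Dict.mk e).getD "is_a" [])
          | _ => d) d).getD i []
        = if d.contains i then d.getD i [] else pvGetIsas (pvGetInfo i go)) := by
  intro go
  induction go with
  | nil =>
    intro _ d i
    refine ⟨by simp [pvGetInfo], ?_⟩
    by_cases hc : d.contains i = true
    · simp [hc]
    · simp only [List.foldl_nil, pvGetInfo, pvGetIsas, if_neg hc]
      exact PySem.Dict.getD_of_not_contains d [] (Bool.not_eq_true _ ▸ hc)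
  | cons e rest ih =>
    intro hP d i
    have he := hP e List.mem_cons_self
    have hR : ∀ x ∈ rest, (PySem.Dict.mk x).get? "id" ≠ some [] :=
      fun x hx => hP x (List.mem_cons_of_mem _ hx)
    simp only [List.foldl_cons]
    cases hm : (PySem.Dict.mk e).get? "id" with
    | none =>
      simp only [pvGetInfo, hm]
      exact ih hR d i
    | some v =>
      cases v with
      | nil => exact absurd hm he
      | cons h t =>
        simp only [pvGetInfo, hm]
        have hget0 : (PySem.List.pyGet? (h :: t) (0 : Int) == some i) = (h == i) := by
          simp [PySem.List.pyGet?, PySem.List.pyIdx?]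
        rw [hget0]
        by_cases hih : h = i
        · subst hih
          simp only [beq_self_eq_true, if_pos]
          set d' := d.setdefault h ((PySem.Dict.mk e).getD "is_a" []) with hd'
          have hcd' : d'.contains h = true := by
            rw [hd']
            by_cases hc : d.contains h = true
            · rw [PySem.Dict.setdefault_of_contains d _ hc]; exact hc
            · rw [PySem.Dict.setdefault_of_not_contains d _ (Bool.not_eq_true _ ▸ hc)]
              exact PySem.Dict.contains_insert_self d h _
          obtain ⟨ihc, ihg⟩ := ih hR d' h
          constructor
          · rw [ihc, hcd']
            simp
          · rw [ihg, if_pos hcd']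
            by_cases hc : d.contains h = true
            · rw [if_pos hc, hd', PySem.Dict.setdefault_of_contains d _ hc]
            · rw [if_neg hc, hd',
                PySem.Dict.setdefault_of_not_contains d _ (Bool.not_eq_true _ ▸ hc),
                PySem.Dict.getD_eq_get?_getD, PySem.Dict.get?_insert_self, Option.getD_some,
                PySem.Dict.getD_eq_get?_getD]
              simp only [pvGetIsas]
              cases (PySem.Dict.mk e).get? "is_a" <;> rfl
        · have hbeq : (h == i) = false := beq_eq_false_iff_ne.mpr hih
          rw [hbeq]
          simp only [Bool.false_eq_true, if_false]
          set d' := d.setdefault h ((PySem.Dict.mk e).getD "is_a" []) with hd'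
          have hcd' : d'.contains i = d.contains i := by
            rw [hd']
            by_cases hc : d.contains h = true
            · rw [PySem.Dict.setdefault_of_contains d _ hc]
            · rw [PySem.Dict.setdefault_of_not_contains d _ (Bool.not_eq_true _ ▸ hc),
                PySem.Dict.contains_insert, beq_eq_false_iff_ne.mpr (Ne.symm hih)]
              simp
          have hgd' : d'.getD i [] = d.getD i [] := by
            rw [hd']
            by_cases hc : d.contains h = true
            · rw [PySem.Dict.setdefault_of_contains d _ hc]
            · rw [PySem.Dict.setdefault_of_not_contains d _ (Bool.not_eq_true _ ▸ hc),
                PySem.Dict.getD_insert_of_ne d _ _ (Ne.symm hih)]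
          obtain ⟨ihc, ihg⟩ := ih hR d' i
          exact ⟨by rw [ihc, hcd'], by rw [ihg, hcd', hgd']⟩

-- the parents dict has at most one key per ontology entry
theorem pvBuildParents_keys_le_aux : ∀ (go : List (List (String × List String)))
    (d : PySem.Dict String (List String)),
    (go.foldl (fun d e =>
      match (PySem.Dict.mk e).get? "id" with
      | some (h :: _) => d.setdefault h ((PySem.Dict.mk e).getD "is_a" [])
      | _ => d) d).keys.length ≤ d.keys.length + go.length := by
  intro go
  induction go with
  | nil => intro d; simp
  | cons e rest ih =>
    intro d
    simp only [List.foldl_cons, List.length_cons]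
    refine le_trans (ih _) ?_
    have hstep : (match (PySem.Dict.mk e).get? "id" with
        | some (h :: _) => d.setdefault h ((PySem.Dict.mk e).getD "is_a" [])
        | _ => d).keys.length ≤ d.keys.length + 1 := by
      cases hm : (PySem.Dict.mk e).get? "id" with
      | none => simp
      | some v =>
        cases v with
        | nil => simp
        | cons h t =>
          simp only
          by_cases hc : d.contains h = true
          · rw [PySem.Dict.setdefault_of_contains d _ hc]; omega
          · rw [PySem.Dict.setdefault_of_not_contains d _ (Bool.not_eq_true _ ▸ hc),
              PySem.Dict.keys_insert_of_not_contains d _ (Bool.not_eq_true _ ▸ hc)]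
            simp
    omega

theorem pvBuildParents_keys_le (go : List (List (String × List String))) :
    (pvBuildParents go).keys.length ≤ go.length := by
  have := pvBuildParents_keys_le_aux go PySem.Dict.empty
  simpa [pvBuildParents, PySem.Dict.empty, PySem.Dict.keys] using this

theorem pvDfs_append (d : PySem.Dict String (List String)) (ys : List String) :
    ∀ (xs : List String) (S : PySem.Set String),
      pvDfs d (xs ++ ys) S = pvDfs d ys (pvDfs d xs S) := by
  intro xs S
  induction xs, S using pvDfs.induct d with
  | case1 S => simp [pvDfs]
  | case2 i rest S h ih =>
    rw [List.cons_append, pvDfs, if_pos h, ih, pvDfs, if_pos h]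
  | case3 i rest S h ih =>
    rw [List.cons_append, pvDfs, if_neg h, ← List.append_assoc, ih]
    conv_rhs => rw [pvDfs, if_neg h]

theorem pvDfs_mono (d : PySem.Dict String (List String)) :
    ∀ (stack : List String) (S : PySem.Set String) (x : String),
      x ∈ S → x ∈ pvDfs d stack S := by
  intro stack S
  induction stack, S using pvDfs.induct d with
  | case1 S => intro x hx; rw [pvDfs]; exact hx
  | case2 i rest S h ih => intro x hx; rw [pvDfs, if_pos h]; exact ih x hx
  | case3 i rest S h ih =>
    intro x hx
    rw [pvDfs, if_neg h]
    exact ih x ((PySem.Set.mem_add S i x).mpr (Or.inl hx))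

theorem pvCnt_antitone (d : PySem.Dict String (List String)) (S T : PySem.Set String)
    (h : ∀ x, x ∈ S → x ∈ T) : pvCnt d T ≤ pvCnt d S := by
  apply List.countP_mono_left
  intro x _ hx
  simp only [Bool.not_eq_true'] at hx ⊢
  cases hcs : PySem.Set.contains S x with
  | false => rfl
  | true =>
    exfalso
    have hmem : x ∈ T := h x ((PySem.Set.contains_iff S x).mp hcs)
    rw [(PySem.Set.contains_iff T x).mpr hmem] at hx
    exact absurd hx (by simp)

-- the bridge: A's recursive explore agrees with B's stack DFS, worklist by worklist
theorem pvBridge (go : List (List (String × List String)))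
    (hP : ∀ e ∈ go, (PySem.Dict.mk e).get? "id" ≠ some []) :
    ∀ (n f : Nat) (stack : List String) (S : PySem.Set String),
      pvCnt (pvBuildParents go) S ≤ n → 1 + pvCnt (pvBuildParents go) S ≤ f →
      pvDfs (pvBuildParents go) stack S
        = stack.foldl (fun T p => if PySem.Set.contains T p then T else pvExplore go f p T) S := by
  intro n
  induction n using Nat.strong_induction_on with
  | _ n IH =>
    intro f stack
    induction stack with
    | nil => intro S _ _; rw [pvDfs, List.foldl_nil]
    | cons i rest ihs =>
      intro S hn hf
      have hag := pvBuildParents_agree go hP PySem.Dict.empty i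
      rw [PySem.Dict.contains_empty, Bool.false_or, if_neg (by simp)] at hag
      obtain ⟨hc0, hg0⟩ := hag
      have hc : (pvBuildParents go).contains i = (pvGetInfo i go).isSome := hc0
      have hg : (pvBuildParents go).getD i [] = pvGetIsas (pvGetInfo i go) := hg0
      clear hc0 hg0
      by_cases hm : PySem.Set.contains S i = true
      · rw [pvDfs, if_pos hm, List.foldl_cons, if_pos hm]
        exact ihs S hn hf
      · have hm' : PySem.Set.contains S i = false := by
          cases h : PySem.Set.contains S i
          · rfl
          · exact absurd h hm
        cases f with
        | zero => omega
        | succ f' =>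
          rw [pvDfs, if_neg hm, List.foldl_cons, if_neg hm]
          by_cases hkey : (pvBuildParents go).contains i = true
          · -- i is a known go id: one recursive explore = one DFS segment
            have hkm : i ∈ (pvBuildParents go).keys :=
              (PySem.Dict.contains_iff_mem_keys _ i).mp hkey
            have hlt : pvCnt (pvBuildParents go) (PySem.Set.add S i) < pvCnt (pvBuildParents go) S :=
              pvCnt_add_of_mem_keys _ S i hkm hm'
            have hexp : pvExplore go (f' + 1) i S
                = (pvGetIsas (pvGetInfo i go)).foldl
                    (fun T p => if PySem.Set.contains T p then T else pvExplore go f' p T)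
                    (PySem.Set.add S i) := by
              by_cases his : pvGetIsas (pvGetInfo i go) = [] <;>
                simp [pvExplore, his]
            have hinner := IH (pvCnt (pvBuildParents go) (PySem.Set.add S i)) (by omega) f'
              (pvGetIsas (pvGetInfo i go)) (PySem.Set.add S i) le_rfl (by omega)
            rw [hexp, ← hinner, hg, pvDfs_append]
            have hcle : pvCnt (pvBuildParents go)
                (pvDfs (pvBuildParents go) (pvGetIsas (pvGetInfo i go)) (PySem.Set.add S i))
                ≤ pvCnt (pvBuildParents go) (PySem.Set.add S i) := by
              apply pvCnt_antitone
              intro x hx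
              exact pvDfs_mono _ _ _ x hx
            exact IH (pvCnt (pvBuildParents go)
              (pvDfs (pvBuildParents go) (pvGetIsas (pvGetInfo i go)) (PySem.Set.add S i)))
              (by omega) (f' + 1) rest _ le_rfl (by omega)
          · -- unknown id: no entry, no parents, both sides just add it and move on
            have hkey' : (pvBuildParents go).contains i = false := by
              cases h : (pvBuildParents go).contains i
              · rfl
              · exact absurd h hkey
            have hnone : pvGetInfo i go = none := by
              rw [hkey'] at hc
              cases h : pvGetInfo i go
              · rfl
              · rw [h] at hc; simp at hc
            have hexp : pvExplore go (f' + 1) i S = PySem.Set.add S i := by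
              simp [pvExplore, hnone, pvGetIsas]
            rw [PySem.Dict.getD_of_not_contains _ [] hkey', List.nil_append, hexp]
            have hle : pvCnt (pvBuildParents go) (PySem.Set.add S i) ≤ pvCnt (pvBuildParents go) S :=
              pvCnt_add_le _ S i
            exact ihs (PySem.Set.add S i) (by omega) (by omega)

theorem pvExplore_eq_dfs (go : List (List (String × List String)))
    (hP : ∀ e ∈ go, (PySem.Dict.mk e).get? "id" ≠ some []) (gid : String) :
    pvExplore go (go.length + 1) gid PySem.Set.empty
      = pvDfs (pvBuildParents go) [gid] PySem.Set.empty := by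
  have hcempty : ∀ k : String, PySem.Set.contains (PySem.Set.empty : PySem.Set String) k = false := by
    intro k; simp [PySem.Set.contains, PySem.Set.empty]
  have hcnt : pvCnt (pvBuildParents go) PySem.Set.empty = (pvBuildParents go).keys.length := by
    unfold pvCnt
    simp
  have hb := pvBridge go hP (pvCnt (pvBuildParents go) PySem.Set.empty) (go.length + 1)
    [gid] PySem.Set.empty le_rfl
    (by rw [hcnt]; have := pvBuildParents_keys_le go; omega)
  rw [hb, List.foldl_cons, List.foldl_nil, if_neg (by rw [hcempty gid]; simp)]

-- ===== VERDICT (by name: the statement is the Claim_ definition above) =====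
theorem pvPerGene (ens_to_hgnc_dict : List (String × String)) (annotations_hgnc : List (String × List String)) (go : List (List (String × List String)))
    (hP : ∀ e ∈ go, (PySem.Dict.mk e).get? "id" ≠ some []) (ens : String) :
    (let hgnc := match (PySem.Dict.mk ens_to_hgnc_dict).get? ens with
      | some h => h
      | none => "Not Found"
     let sup0 : PySem.Set String := PySem.Set.empty
     if hgnc ≠ "Not Found" then
       let go_ids := match (PySem.Dict.mk annotations_hgnc).get? hgnc with
         | some g => g
         | none => []
       if go_ids ≠ [] then
         go_ids.foldl (fun s gid => PySem.Set.union s (pvExplore go (go.length + 1) gid PySem.Set.empty)) sup0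
       else sup0
     else sup0)
    = pvAncestors (pvBuildParents go) ens_to_hgnc_dict annotations_hgnc ens := by
  unfold pvAncestors
  rw [PySem.Dict.getD_eq_get?_getD]
  cases hge : (PySem.Dict.mk ens_to_hgnc_dict).get? ens with
  | none => simp
  | some h =>
    simp only [Option.getD_some]
    by_cases hh : h = "Not Found"
    · simp [hh]
    · rw [if_pos hh, if_neg hh, PySem.Dict.getD_eq_get?_getD]
      cases hga : (PySem.Dict.mk annotations_hgnc).get? h with
      | none => simp
      | some gl =>
        simp only [Option.getD_some]
        cases gl with
        | nil => simp
        | cons g0 gtl =>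
          rw [if_pos (by simp)]
          apply PySem.List.foldl_congr_mem
          intro acc x _
          rw [pvExplore_eq_dfs go hP x]

theorem create_go_dicts_spec : Claim_equal_create_go_dicts := by
  intro ens_ids ens_to_hgnc_dict annotations_hgnc gene_ontology _ hPre
  unfold Spec_create_go_dicts create_go_dicts create_go_dicts_alt
  rw [PySem.List.foldl_append_eq_flatMap, List.nil_append]
  apply List.flatMap_congr
  intro ens _
  exact pvPerGene ens_to_hgnc_dict annotations_hgnc gene_ontology hPre ens
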